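-- pv_equiv track=rewrite | github.com/mengxiayu/COSER | code/run_pipeline.py | extract_unique_contexts
-- ===== SOURCE A (Python) =====
-- def extract_unique_contexts(text):
--     search_string = "Extracted Context:"
--     results = []
--     start_pos = 0
--
--     while True:
--         # Find next occurrence
--         index = text.find(search_string, start_pos)
--         if index == -1:  # No more occurrences found
--             break
--         # Find the start of the next occurrence (if any)
--         next_index = text.find(search_string, index + 1)
--         if next_index == -1:  # This is the last occurrence
--             results.append(text[index + len(search_string):].strip())
--         else:
--             # Add text from this occurrence up to the next one
--             results.append(text[index + len(search_string):next_index].strip())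
--         # Move start position to just after current occurrence
--         start_pos = index + 1
--     return results
-- ===== SOURCE B (Python) =====
-- def extract_unique_contexts(text):
--     return [seg.strip() for seg in text.split("Extracted Context:")[1:]]
-- ===== Notes on version B (the rewrite author's own statement) =====
-- stated objective: simpler
-- what changed: Replaces the explicit while-loop with two find calls and manual slicing per iteration by a single str.split on the marker, dropping the prefix before the first marker with [1:] and stripping each segment in a comprehension.
import Mathlib
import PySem

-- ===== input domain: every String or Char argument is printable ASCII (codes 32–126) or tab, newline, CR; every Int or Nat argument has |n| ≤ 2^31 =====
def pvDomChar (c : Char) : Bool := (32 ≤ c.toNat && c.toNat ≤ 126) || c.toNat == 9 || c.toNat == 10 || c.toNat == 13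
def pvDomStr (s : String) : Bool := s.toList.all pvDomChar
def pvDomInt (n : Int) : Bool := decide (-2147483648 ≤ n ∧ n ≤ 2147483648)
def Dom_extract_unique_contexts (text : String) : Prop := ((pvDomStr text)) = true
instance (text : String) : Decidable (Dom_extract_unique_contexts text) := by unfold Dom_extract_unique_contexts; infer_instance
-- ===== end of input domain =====

-- B replaces A's while-loop (two find calls and manual slicing per iteration) by one split on the
-- marker, a [1:] slice, and a strip of each segment; objective: simpler.

-- ===== PORT A =====
-- A's while-loop, with fuel making the recursion structural (fuel = len(text)+1 always suffices,
-- since start_pos strictly increases and every find past len(text) returns -1)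
def euc_loopA (text : String) (fuel : Nat) (start_pos : Int) (results : List String) : List String :=
  match fuel with
  | 0 => results
  | Nat.succ fuel =>
    let index := PySem.Str.findFrom text "Extracted Context:" start_pos
    if index = -1 then results
    else
      let next_index := PySem.Str.findFrom text "Extracted Context:" (index + 1)
      if next_index = -1 then
        euc_loopA text fuel (index + 1)
          (results ++ [PySem.Str.strip (PySem.Str.slice text (some (index + PySem.Str.len "Extracted Context:")) none)])
      else
        euc_loopA text fuel (index + 1)
          (results ++ [PySem.Str.strip (PySem.Str.slice text (some (index + PySem.Str.len "Extracted Context:")) (some next_index))])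

def extract_unique_contexts (text : String) : List String :=
  euc_loopA text (text.toList.length + 1) 0 []

-- ===== PORT B =====
def extract_unique_contexts_alt (text : String) : List String :=
  (PySem.List.slice ((PySem.Chars.splitOn text.toList "Extracted Context:".toList).map String.ofList)
      (some 1) none).map PySem.Str.strip

-- ===== PRECONDITION & SPEC =====
def Spec_extract_unique_contexts (text : String) (out : List String) : Prop := out = extract_unique_contexts_alt text
instance (text : String) (out : List String) : Decidable (Spec_extract_unique_contexts text out) := by unfold Spec_extract_unique_contexts; infer_instance

-- ===== CLAIM (what is proved, stated in full; the proofs are below) =====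
def Claim_equal_extract_unique_contexts : Prop := ∀ (text : String), Dom_extract_unique_contexts text → Spec_extract_unique_contexts text (extract_unique_contexts text)

-- ===== LEMMAS AND PROOFS =====

def sepL : List Char := ['E','x','t','r','a','c','t','e','d',' ','C','o','n','t','e','x','t',':']
theorem sep_toList : "Extracted Context:".toList = sepL := by decide

def findN : List Char → Option Nat
  | [] => none
  | c :: rest => if sepL.isPrefixOf (c :: rest) then some 0 else (findN rest).map (· + 1)
def splitSimple : List Char → List (List Char)
  | [] => [[]]
  | c :: rest =>
    if sepL.isPrefixOf (c :: rest) then [] :: splitSimple (List.drop 17 rest)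
    else (splitSimple rest).modifyHead (c :: ·)
termination_by l => l.length
decreasing_by all_goals (simp [List.length_drop]; try omega)

theorem find_go_eq (l : List Char) (k : Nat) :
    PySem.Chars.find.go sepL l k = match findN l with | none => -1 | some n => ((k : Int) + n) := by
  induction l generalizing k with
  | nil => rw [PySem.Chars.find.go]; simp [findN, sepL]
  | cons c rest ih =>
    rw [PySem.Chars.find.go]
    by_cases h : sepL.isPrefixOf (c :: rest)
    · simp [findN, h]
    · simp only [findN, h, Bool.false_eq_true, if_false, ih]
      cases findN rest <;> simp; ring

theorem find_eq (l : List Char) :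
    PySem.Chars.find l sepL = match findN l with | none => -1 | some n => (n : Int) := by
  rw [PySem.Chars.find, find_go_eq]; cases findN l <;> simp

theorem go_shift (fuel : Nat) (l cur : List Char) (acc : List (List Char)) :
    PySem.Chars.splitOn.go sepL fuel l cur acc
      = acc.reverse ++ (PySem.Chars.splitOn.go sepL fuel l [] []).modifyHead (cur.reverse ++ ·) := by
  induction fuel generalizing l cur acc with
  | zero => rw [PySem.Chars.splitOn.go, PySem.Chars.splitOn.go]; simp
  | succ f ih =>
    cases l with
    | nil => rw [PySem.Chars.splitOn.go, PySem.Chars.splitOn.go] <;> simp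
    | cons c rest =>
      rw [PySem.Chars.splitOn.go]
      conv_rhs => rw [PySem.Chars.splitOn.go]
      by_cases h : sepL.isPrefixOf (c :: rest)
      · simp only [h, if_true]
        rw [ih _ _ (cur.reverse :: acc), ih _ _ ([([] : List Char).reverse] : List (List Char))]
        simp
      · simp only [h, Bool.false_eq_true, if_false]
        rw [ih rest (c :: cur) acc, ih rest [c] []]
        simp only [List.reverse_nil, List.nil_append, List.modifyHead_modifyHead]
        rcases PySem.Chars.splitOn.go sepL f rest [] [] with _ | ⟨hd, tl⟩ <;> simp

theorem go_eq_splitSimple (fuel : Nat) (l : List Char) (h : l.length < fuel) :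
    PySem.Chars.splitOn.go sepL fuel l [] [] = splitSimple l := by
  induction fuel generalizing l with
  | zero => omega
  | succ f ih =>
    cases l with
    | nil =>
      rw [PySem.Chars.splitOn.go]
      · simp [splitSimple]
      · omega
    | cons c rest =>
      rw [PySem.Chars.splitOn.go]
      by_cases hp : sepL.isPrefixOf (c :: rest)
      · simp only [hp, if_true]
        rw [go_shift, ih]
        · simp only [show List.drop sepL.length (c :: rest) = List.drop 17 rest from rfl]
          cases h' : splitSimple (List.drop 17 rest) <;> simp [splitSimple, hp, h']
        · have hs : sepL.length = 18 := rfl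
          simp only [List.length_drop, hs, List.length_cons]
          simp at h; omega
      · simp only [hp, Bool.false_eq_true, if_false]
        rw [go_shift, ih rest (by simp at h ⊢; omega)]
        simp [splitSimple, hp]

theorem splitOn_eq (l : List Char) : PySem.Chars.splitOn l sepL = splitSimple l := by
  rw [PySem.Chars.splitOn, go_eq_splitSimple]; omega

theorem splitSimple_char (l : List Char) :
    splitSimple l = match findN l with
      | none => [l]
      | some i => List.take i l :: splitSimple (List.drop (i + 18) l) := by
  induction hn : l.length using Nat.strong_induction_on generalizing l with
  | _ n ih =>
  cases l with
  | nil => simp [splitSimple, findN]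
  | cons c rest =>
    by_cases hp : sepL.isPrefixOf (c :: rest)
    · simp [splitSimple, findN, hp]
    · rw [splitSimple, if_neg (by simp [hp])]
      rw [ih rest.length (by simp [← hn]) rest rfl]
      simp only [findN, hp, Bool.false_eq_true, if_false]
      cases hf : findN rest with
      | none => simp
      | some i => simp [List.drop_succ_cons, show i + 1 + 18 = i + 18 + 1 from by omega]

theorem findN_some_le {l : List Char} {j : Nat} (h : findN l = some j) : j + 18 ≤ l.length := by
  induction l generalizing j with
  | nil => simp [findN] at h
  | cons c rest ih =>
    rw [findN] at h
    by_cases hp : sepL.isPrefixOf (c :: rest)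
    · rw [if_pos hp] at h
      have hle := List.IsPrefix.length_le (List.isPrefixOf_iff_prefix.mp hp)
      simp_all [sepL]; omega
    · rw [if_neg (by simp [hp])] at h
      cases hf : findN rest with
      | none => simp [hf] at h
      | some n => simp [hf] at h; have := ih hf; simp; omega

theorem findN_some_prefix {l : List Char} {j : Nat} (h : findN l = some j) :
    sepL.isPrefixOf (List.drop j l) = true := by
  induction l generalizing j with
  | nil => simp [findN] at h
  | cons c rest ih =>
    rw [findN] at h
    by_cases hp : sepL.isPrefixOf (c :: rest)
    · rw [if_pos hp] at h
      simp at h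
      simpa [← h] using hp
    · rw [if_neg (by simp [hp])] at h
      cases hf : findN rest with
      | none => simp [hf] at h
      | some n =>
        simp [hf] at h
        rw [← h, List.drop_succ_cons]
        exact ih hf

theorem no_overlap {u : List Char} (h : sepL.isPrefixOf u = true) (d : Nat) (h1 : 1 ≤ d) (h2 : d < 18) :
    ¬ sepL.isPrefixOf (List.drop d u) = true := by
  obtain ⟨r, rfl⟩ := List.isPrefixOf_iff_prefix.mp h
  have hd : List.drop d (sepL ++ r) = List.drop d sepL ++ r := by
    apply List.drop_append_of_le_length
    simp [sepL]; omega
  rw [hd]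
  interval_cases d <;> simp [sepL, List.isPrefixOf]

theorem findN_skip {m : Nat} {u : List Char} (h : ∀ d < m, ¬ sepL.isPrefixOf (List.drop d u) = true) :
    findN u = (findN (List.drop m u)).map (· + m) := by
  induction m generalizing u with
  | zero => simp
  | succ m ih =>
    have h0 : ¬ sepL.isPrefixOf u = true := by simpa using h 0 (by omega)
    cases u with
    | nil => simp [findN]
    | cons c rest =>
      rw [findN, if_neg (by simp [h0])]
      rw [ih (u := rest) (fun d hd => by simpa [List.drop_succ_cons] using h (d+1) (by omega))]
      simp [List.drop_succ_cons]

theorem findN_shift {u : List Char} (h : sepL.isPrefixOf u = true) :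
    findN (List.drop 1 u) = (findN (List.drop 18 u)).map (· + 17) := by
  rw [findN_skip (m := 17) (u := List.drop 1 u) (fun d hd => by
    rw [List.drop_drop, Nat.add_comm 1 d]
    exact no_overlap h (d + 1) (by omega) (by omega))]
  simp

def tailSegs (u : List Char) : List (List Char) :=
  match findN u with
  | none => []
  | some j => (splitSimple (List.drop (j + 18) u)).map PySem.Chars.strip

theorem loop_eq (text : String) (fuel p : Nat) (results : List String)
    (hp : p ≤ text.toList.length) (hf : text.toList.length < fuel + p) :
    euc_loopA text fuel (p : Int) results
      = results ++ (tailSegs (List.drop p text.toList)).map String.ofList := by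
  induction fuel generalizing p results with
  | zero => omega
  | succ fuel ih =>
    rw [euc_loopA]
    simp only [PySem.Str.findFrom, sep_toList]
    rw [PySem.Chars.findFrom_natCast _ _ p hp]
    rw [find_eq]
    cases hj : findN (List.drop p text.toList) with
    | none => simp [tailSegs, hj]
    | some j =>
      have hj18 : j + 18 ≤ (List.drop p text.toList).length := findN_some_le hj
      rw [List.length_drop] at hj18
      have hpre : sepL.isPrefixOf (List.drop (p + j) text.toList) = true := by
        have := findN_some_prefix hj
        rwa [List.drop_drop] at this
      rw [if_neg (show ¬((j:Int) = -1) by omega), if_neg (show ¬((p:Int) + j = -1) by omega)]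
      rw [show ((p:Int) + j + 1) = ((p+j+1 : Nat) : Int) by push_cast; ring]
      rw [PySem.Chars.findFrom_natCast _ _ (p+j+1) (by omega)]
      rw [find_eq]
      have hshift : findN (List.drop (p+j+1) text.toList)
          = (findN (List.drop (p+j+18) text.toList)).map (· + 17) := by
        have := findN_shift hpre
        rwa [List.drop_drop, List.drop_drop] at this
      rw [hshift]
      have hlen18 : PySem.Str.len "Extracted Context:" = (18 : Int) := by decide
      cases hj' : findN (List.drop (p+j+18) text.toList) with
      | none =>
        simp only [Option.map_none, ite_true]
        rw [ih (p+j+1) _ (by omega) (by omega)]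
        have htail1 : tailSegs (List.drop (p+j+1) text.toList) = [] := by
          simp [tailSegs, hshift, hj']
        have hpiece : PySem.Str.strip (PySem.Str.slice text (some ((p:Int) + j + PySem.Str.len "Extracted Context:")) none)
            = String.ofList (PySem.Chars.strip (List.drop (p+j+18) text.toList)) := by
          rw [PySem.Str.strip, hlen18, PySem.Str.toList_slice]
          rw [show ((p:Int) + j + 18) = ((p+j+18 : Nat) : Int) by push_cast; ring]
          rw [PySem.Chars.slice_eq_listSlice, PySem.List.slice_from_natCast]
        rw [hpiece, htail1]
        have htail : tailSegs (List.drop p text.toList)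
            = [PySem.Chars.strip (List.drop (p+j+18) text.toList)] := by
          simp only [tailSegs, hj]
          rw [List.drop_drop, show p + (j + 18) = p+j+18 from by omega]
          rw [splitSimple_char, hj']
          simp
        rw [htail]
        simp
      | some j' =>
        simp only [Option.map_some]
        rw [if_neg (show ¬(((j'+17:Nat):Int) = -1) by omega),
            if_neg (show ¬(((p+j+1:Nat):Int) + ((j'+17:Nat):Int) = -1) by push_cast; omega)]
        rw [ih (p+j+1) _ (by omega) (by omega)]
        have hpiece : PySem.Str.strip (PySem.Str.slice text (some ((p:Int) + j + PySem.Str.len "Extracted Context:"))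
              (some (((p+j+1:Nat):Int) + ((j'+17:Nat):Int))))
            = String.ofList (PySem.Chars.strip (List.take j' (List.drop (p+j+18) text.toList))) := by
          rw [PySem.Str.strip, hlen18, PySem.Str.toList_slice]
          rw [show ((p:Int) + j + 18) = ((p+j+18 : Nat) : Int) by push_cast; ring,
              show (((p+j+1:Nat):Int) + ((j'+17:Nat):Int)) = ((p+j+18+j' : Nat) : Int) by push_cast; ring]
          rw [PySem.Chars.slice_eq_listSlice, PySem.List.slice_natCast, Nat.add_sub_cancel_left]
        rw [hpiece]
        have htail1 : tailSegs (List.drop (p+j+1) text.toList)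
            = (splitSimple (List.drop (p+j+j'+36) text.toList)).map PySem.Chars.strip := by
          simp only [tailSegs, hshift, hj', Option.map_some]
          rw [List.drop_drop, show p+j+1+(j'+17+18) = p+j+j'+36 from by omega]
        have htail : tailSegs (List.drop p text.toList)
            = PySem.Chars.strip (List.take j' (List.drop (p+j+18) text.toList))
              :: (splitSimple (List.drop (p+j+j'+36) text.toList)).map PySem.Chars.strip := by
          simp only [tailSegs, hj]
          rw [List.drop_drop, show p + (j + 18) = p+j+18 from by omega]
          rw [splitSimple_char, hj']
          simp only [List.map_cons]
          rw [List.drop_drop, show p+j+18+(j'+18) = p+j+j'+36 from by omega]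
        rw [htail1, htail]
        simp

theorem tailSegs_eq (l : List Char) : tailSegs l = ((splitSimple l).tail).map PySem.Chars.strip := by
  cases hj : findN l with
  | none => rw [splitSimple_char, hj]; simp [tailSegs, hj]
  | some i => rw [splitSimple_char, hj]; simp [tailSegs, hj]

-- ===== VERDICT (by name: the statement is the Claim_ definition above) =====
theorem extract_unique_contexts_spec : Claim_equal_extract_unique_contexts := by
  intro text _
  unfold Spec_extract_unique_contexts extract_unique_contexts extract_unique_contexts_alt
  rw [show ((0:Int)) = ((0:Nat):Int) from rfl]
  rw [loop_eq text (text.toList.length+1) 0 [] (by omega) (by omega)]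
  rw [sep_toList, splitOn_eq, PySem.List.slice_from_one, tailSegs_eq]
  have hc : PySem.Str.strip ∘ String.ofList = String.ofList ∘ PySem.Chars.strip := by
    funext cs
    simp [PySem.Str.strip, String.toList_ofList]
  simp [hc]
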